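-- pv_equiv track=rewrite | github.com/sir-Gollum/advent-of-code | aoc2022/t9/solution.py | vis
-- ===== SOURCE A (Python) =====
-- def vis(tx, ty, bx, by, knots):
--     res = []
--     for row_idx, y in enumerate(range(ty, by)):
--         res.append([])
--         for x in range(tx, bx):
--             try:
--                 m = knots.index((x, y))
--                 res[row_idx].append(str(m))
--             except ValueError:
--                 res[row_idx].append('.')
--     return '\n'.join(''.join(r) for r in res)
-- ===== SOURCE B (Python) =====
-- def vis(tx, ty, bx, by, knots):
--     grid = [['.'] * (bx - tx) for _ in range(by - ty)]
--     for m, (x, y) in enumerate(knots):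
--         if tx <= x < bx and ty <= y < by and grid[y - ty][x - tx] == '.':
--             grid[y - ty][x - tx] = str(m)
--     return '\n'.join(''.join(row) for row in grid)
-- ===== Notes on version B (the rewrite author's own statement) =====
-- stated objective: alternative
-- what changed: B pre-builds a 2-D grid of '.' cells and scatters the knots into it in one pass (a '.'-guard makes the first, i.e. lowest, index win), instead of A's gather that scans the whole knot list with knots.index once per grid cell.
import Mathlib
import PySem

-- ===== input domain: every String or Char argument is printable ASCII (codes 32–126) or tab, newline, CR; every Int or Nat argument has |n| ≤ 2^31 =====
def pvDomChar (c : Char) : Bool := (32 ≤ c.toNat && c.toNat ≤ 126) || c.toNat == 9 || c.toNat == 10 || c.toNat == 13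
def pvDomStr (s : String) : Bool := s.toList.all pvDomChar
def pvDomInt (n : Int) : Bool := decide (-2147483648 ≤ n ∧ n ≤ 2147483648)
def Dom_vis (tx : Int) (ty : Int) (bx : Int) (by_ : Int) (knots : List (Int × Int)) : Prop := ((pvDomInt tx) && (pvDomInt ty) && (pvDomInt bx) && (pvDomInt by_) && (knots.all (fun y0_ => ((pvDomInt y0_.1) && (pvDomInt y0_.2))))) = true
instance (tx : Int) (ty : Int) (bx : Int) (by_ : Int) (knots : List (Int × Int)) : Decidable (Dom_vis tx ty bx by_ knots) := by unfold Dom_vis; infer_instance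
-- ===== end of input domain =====

-- B scatters each knot once into a pre-built '.'-grid (first write wins via the '.'-guard) instead
-- of A's per-cell linear scan of the knot list (objective: alternative decomposition).

-- ===== PORT A =====
-- literal transliteration of A: per row y, per column x, knots.index((x,y)) or '.', rows appended, then joined
def vis (tx : Int) (ty : Int) (bx : Int) (by_ : Int) (knots : List (Int × Int)) : String :=
  let res := (PySem.List.pyRange ty by_ 1).foldl (fun res y =>
    res ++ [(PySem.List.pyRange tx bx 1).foldl (fun row x =>
      match PySem.List.index? knots (x, y) with
      | some m => row ++ [PySem.Int.toStr (m : Int)]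
      | none   => row ++ ["."]) ([] : List String)]) []
  PySem.Str.join "\n" (res.map (fun r => PySem.Str.join "" r))

-- ===== PORT B =====
-- the loop body of Source B's scatter loop: bounds check, then write str(m) only if the cell is still '.'
-- (grid[r][c] read/write is exact here: the guard ensures 0 ≤ r < len(grid), 0 ≤ c < len(row))
def pvStep (tx ty bx by_ : Int) (g : List (List String)) (p : Int × (Int × Int)) : List (List String) :=
  if tx ≤ p.2.1 ∧ p.2.1 < bx ∧ ty ≤ p.2.2 ∧ p.2.2 < by_ ∧
     (g.getD (p.2.2 - ty).toNat []).getD (p.2.1 - tx).toNat "" = "." then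
    g.set (p.2.2 - ty).toNat
      ((g.getD (p.2.2 - ty).toNat []).set (p.2.1 - tx).toNat (PySem.Int.toStr p.1))
  else g

-- literal transliteration of Source B: build the '.'-grid, scatter enumerate(knots) into it, join rows
def vis_alt (tx : Int) (ty : Int) (bx : Int) (by_ : Int) (knots : List (Int × Int)) : String :=
  let grid0 : List (List String) :=
    (PySem.List.pyRange 0 (by_ - ty) 1).map (fun _ => PySem.List.pyRepeat ["."] (bx - tx))
  let grid := (PySem.List.enumerate knots 0).foldl (pvStep tx ty bx by_) grid0
  PySem.Str.join "\n" (grid.map (fun row => PySem.Str.join "" row))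

-- ===== PRECONDITION & SPEC =====
def Spec_vis (tx : Int) (ty : Int) (bx : Int) (by_ : Int) (knots : List (Int × Int)) (out : String) : Prop := out = vis_alt tx ty bx by_ knots
instance (tx : Int) (ty : Int) (bx : Int) (by_ : Int) (knots : List (Int × Int)) (out : String) : Decidable (Spec_vis tx ty bx by_ knots out) := by unfold Spec_vis; infer_instance

-- ===== CLAIM (what is proved, stated in full; the proofs are below) =====
def Claim_equal_vis : Prop := ∀ (tx : Int) (ty : Int) (bx : Int) (by_ : Int) (knots : List (Int × Int)), Dom_vis tx ty bx by_ knots → Spec_vis tx ty bx by_ knots (vis tx ty bx by_ knots)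

-- ===== LEMMAS AND PROOFS =====

-- digit characters are never '.'
theorem pv_digitChar_ne_dot (k : Nat) : Nat.digitChar k ≠ '.' := by
  rcases Nat.lt_or_ge k 16 with h | h
  · interval_cases k <;> decide
  · have h16 : Nat.digitChar k = '*' := by
      rw [Nat.digitChar.eq_def]
      rw [if_neg (by omega), if_neg (by omega), if_neg (by omega), if_neg (by omega),
        if_neg (by omega), if_neg (by omega), if_neg (by omega), if_neg (by omega),
        if_neg (by omega), if_neg (by omega), if_neg (by omega), if_neg (by omega),
        if_neg (by omega), if_neg (by omega), if_neg (by omega), if_neg (by omega)]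
    rw [h16]; decide

-- nor is any character produced by Nat.toDigitsCore over a '.'-free accumulator
theorem pv_toDigits_ne_dot (b f n : Nat) (l : List Char) (hl : '.' ∉ l) :
    '.' ∉ Nat.toDigitsCore b f n l := by
  induction f generalizing n l with
  | zero => exact hl
  | succ f ih =>
    show '.' ∉ (if n / b = 0 then (n % b).digitChar :: l
                else Nat.toDigitsCore b f (n / b) ((n % b).digitChar :: l))
    have hnotin : '.' ∉ (n % b).digitChar :: l := by
      intro hmem
      rcases List.mem_cons.mp hmem with h | h
      · exact pv_digitChar_ne_dot (n % b) h.symm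
      · exact hl h
    split_ifs
    · exact hnotin
    · exact ih (n / b) _ hnotin

-- str(m) is never "." (so a written cell never satisfies the '.'-guard again)
theorem pv_toStr_ne_dot (m : Int) : PySem.Int.toStr m ≠ "." := by
  intro h
  have h2 : (PySem.Int.toStr m).toList = ['.'] := by rw [h]; rfl
  rw [PySem.Int.toList_toStr] at h2
  unfold PySem.Int.toChars at h2
  split_ifs at h2 with hm
  · exact absurd (List.head_eq_of_cons_eq h2) (by decide)
  · have hmem : '.' ∈ Nat.toDigits 10 m.toNat := by rw [h2]; exact List.mem_singleton.mpr rfl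
    rw [Nat.toDigits] at hmem
    exact pv_toDigits_ne_dot 10 (m.toNat + 1) m.toNat [] (by simp) hmem

-- pvStep preserves the grid shape
theorem pvStep_shape (tx ty bx by_ : Int) (g : List (List String)) (p : Int × (Int × Int))
    (hlen : g.length = (by_ - ty).toNat) (hrows : ∀ row ∈ g, row.length = (bx - tx).toNat) :
    (pvStep tx ty bx by_ g p).length = (by_ - ty).toNat ∧
    ∀ row ∈ pvStep tx ty bx by_ g p, row.length = (bx - tx).toNat := by
  unfold pvStep
  split_ifs with hcond
  · rcases Nat.lt_or_ge (p.2.2 - ty).toNat g.length with hr | hr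
    · refine ⟨by simp [hlen], ?_⟩
      intro row hrow
      rcases List.mem_or_eq_of_mem_set hrow with h | h
      · exact hrows _ h
      · subst h
        rw [List.length_set, List.getD_eq_getElem?_getD, List.getElem?_eq_getElem hr]
        exact hrows _ (List.getElem_mem hr)
    · rw [List.set_eq_of_length_le hr]
      exact ⟨hlen, hrows⟩
  · exact ⟨hlen, hrows⟩

-- the fold of pvStep preserves the grid shape
theorem pvShape_foldl (tx ty bx by_ : Int) (l : List (Int × (Int × Int))) (g : List (List String))
    (hlen : g.length = (by_ - ty).toNat) (hrows : ∀ row ∈ g, row.length = (bx - tx).toNat) :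
    (l.foldl (pvStep tx ty bx by_) g).length = (by_ - ty).toNat ∧
    ∀ row ∈ l.foldl (pvStep tx ty bx by_) g, row.length = (bx - tx).toNat := by
  induction l generalizing g with
  | nil => exact ⟨hlen, hrows⟩
  | cons p l ih =>
    obtain ⟨h1, h2⟩ := pvStep_shape tx ty bx by_ g p hlen hrows
    exact ih _ h1 h2

-- the central scatter invariant: after folding the (enumerated from i) remaining knots into a
-- well-shaped grid g, cell (r, c) keeps its old value unless it was '.', in which case it becomes
-- str(i + first index of (tx+c, ty+r) among the remaining knots) (or stays '.')
theorem pvCell (tx ty bx by_ : Int) (ks : List (Int × Int)) (i : Int) (g : List (List String))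
    (hlen : g.length = (by_ - ty).toNat) (hrows : ∀ row ∈ g, row.length = (bx - tx).toNat)
    (r c : Nat) (hr : r < (by_ - ty).toNat) (hc : c < (bx - tx).toNat) :
    ((((PySem.List.enumerate ks i).foldl (pvStep tx ty bx by_) g).getD r []).getD c "")
    = if (g.getD r []).getD c "" = "." then
        (match PySem.List.index? ks (tx + (c : Int), ty + (r : Int)) with
         | some m => PySem.Int.toStr (i + (m : Int))
         | none => ".")
      else (g.getD r []).getD c "" := by
  induction ks generalizing g i with
  | nil =>
    simp only [PySem.List.enumerate_nil, List.foldl_nil]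
    rw [PySem.List.index?_eq_idxOf?]
    by_cases h : (g.getD r []).getD c "" = "." <;> simp only [h, List.idxOf?_nil, if_pos, if_false]
  | cons a ks ih =>
    obtain ⟨ax, ay⟩ := a
    rw [PySem.List.enumerate_cons, List.foldl_cons]
    obtain ⟨hs1, hs2⟩ := pvStep_shape tx ty bx by_ g (i, (ax, ay)) hlen hrows
    rw [ih (i + 1) _ hs1 hs2]
    have hrlen : r < g.length := by rw [hlen]; exact hr
    have hrowlen : (g.getD r []).length = (bx - tx).toNat := by
      rw [List.getD_eq_getElem?_getD, List.getElem?_eq_getElem hrlen]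
      exact hrows _ (List.getElem_mem hrlen)
    by_cases hpa : (ax, ay) = ((tx + (c : Int), ty + (r : Int)) : Int × Int)
    · -- this knot is exactly the target cell
      rw [Prod.mk.injEq] at hpa
      obtain ⟨hax, hay⟩ := hpa
      subst hax; subst hay
      have hρ : ((ty + (r : Int)) - ty).toNat = r := by omega
      have hγ : ((tx + (c : Int)) - tx).toNat = c := by omega
      rw [PySem.List.index?_cons_self]
      by_cases hcell : (g.getD r []).getD c "" = "."
      · -- the cell is still '.', so this knot writes str(i) and later knots are blocked
        have hstep : pvStep tx ty bx by_ g (i, (tx + (c : Int), ty + (r : Int)))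
            = g.set r ((g.getD r []).set c (PySem.Int.toStr i)) := by
          unfold pvStep
          simp only [hρ, hγ]
          rw [if_pos ⟨by omega, by omega, by omega, by omega, hcell⟩]
        rw [hstep]
        have hrow1 : (g.set r ((g.getD r []).set c (PySem.Int.toStr i))).getD r []
            = (g.getD r []).set c (PySem.Int.toStr i) := by
          rw [List.getD_eq_getElem?_getD, List.getElem?_set, if_pos rfl, if_pos hrlen,
            Option.getD_some]
        have hcell' : (((g.set r ((g.getD r []).set c (PySem.Int.toStr i))).getD r []).getD c "")
            = PySem.Int.toStr i := by
          rw [hrow1, List.getD_eq_getElem?_getD, List.getElem?_set, if_pos rfl,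
            if_pos (by rw [hrowlen]; exact hc), Option.getD_some]
        rw [hcell', if_neg (pv_toStr_ne_dot i), if_pos hcell]
        norm_num
      · -- the cell was already written: the guard fails, nothing changes
        have hstep : pvStep tx ty bx by_ g (i, (tx + (c : Int), ty + (r : Int))) = g := by
          unfold pvStep
          simp only [hρ, hγ]
          rw [if_neg (fun hh => hcell hh.2.2.2.2)]
        rw [hstep, if_neg hcell, if_neg hcell]
    · -- this knot is a different point: the target cell is untouched by this step
      have huntouched : (((pvStep tx ty bx by_ g (i, (ax, ay))).getD r []).getD c "")
          = (g.getD r []).getD c "" := by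
        unfold pvStep
        dsimp only
        split_ifs with hg
        · obtain ⟨h1, h2, h3, h4, _⟩ := hg
          by_cases hρr : (ay - ty).toNat = r
          · have hγc : (ax - tx).toNat ≠ c := by
              intro hγc
              exact hpa (by rw [Prod.mk.injEq]; constructor <;> omega)
            subst hρr
            have hrow1 : (g.set ((ay - ty).toNat)
                ((g.getD ((ay - ty).toNat) []).set ((ax - tx).toNat) (PySem.Int.toStr i))).getD
                ((ay - ty).toNat) []
                = (g.getD ((ay - ty).toNat) []).set ((ax - tx).toNat) (PySem.Int.toStr i) := by
              rw [List.getD_eq_getElem?_getD, List.getElem?_set, if_pos rfl, if_pos hrlen,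
                Option.getD_some]
            rw [hrow1, List.getD_eq_getElem?_getD, List.getElem?_set, if_neg hγc,
              ← List.getD_eq_getElem?_getD]
          · have hrow1 : (g.set ((ay - ty).toNat)
                ((g.getD ((ay - ty).toNat) []).set ((ax - tx).toNat) (PySem.Int.toStr i))).getD r []
                = g.getD r [] := by
              rw [List.getD_eq_getElem?_getD, List.getElem?_set, if_neg hρr,
                ← List.getD_eq_getElem?_getD]
            rw [hrow1]
        · rfl
      rw [huntouched, PySem.List.index?_cons_of_ne _ hpa]
      by_cases hcell : (g.getD r []).getD c "" = "."
      · rw [if_pos hcell, if_pos hcell]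
        cases PySem.List.index? ks (tx + (c : Int), ty + (r : Int)) with
        | none => rfl
        | some m =>
          simp only [Option.map_some]
          congr 1
          push_cast
          ring
      · rw [if_neg hcell, if_neg hcell]

-- ===== VERDICT (by name: the statement is the Claim_ definition above) =====
theorem vis_spec : Claim_equal_vis := by
  intro tx ty bx by_ knots _
  show vis tx ty bx by_ knots = vis_alt tx ty bx by_ knots
  unfold vis vis_alt
  -- A-side: turn the append-folds into maps
  have hrow : ∀ y : Int,
      (PySem.List.pyRange tx bx 1).foldl (fun row x =>
        match PySem.List.index? knots (x, y) with
        | some m => row ++ [PySem.Int.toStr (m : Int)]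
        | none   => row ++ ["."]) ([] : List String)
      = (PySem.List.pyRange tx bx 1).map (fun x =>
          match PySem.List.index? knots (x, y) with
          | some m => PySem.Int.toStr (m : Int)
          | none   => ".") := by
    intro y
    have hfun : (fun (row : List String) x =>
        match PySem.List.index? knots (x, y) with
        | some m => row ++ [PySem.Int.toStr (m : Int)]
        | none   => row ++ ["."])
      = fun (row : List String) x => row ++ [match PySem.List.index? knots (x, y) with
          | some m => PySem.Int.toStr (m : Int)
          | none   => "."] := by
      funext row x
      cases PySem.List.index? knots (x, y) <;> rfl
    rw [hfun]
    exact (PySem.List.foldl_append_singleton_eq_map _ _ []).trans (List.nil_append _)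
  rw [PySem.List.foldl_append_singleton_eq_map (fun y =>
    (PySem.List.pyRange tx bx 1).foldl (fun row x =>
      match PySem.List.index? knots (x, y) with
      | some m => row ++ [PySem.Int.toStr (m : Int)]
      | none   => row ++ ["."]) ([] : List String)) _ []]
  simp only [List.nil_append, List.map_map]
  congr 1
  -- B-side grid0 shape
  have hlen0 : ((PySem.List.pyRange 0 (by_ - ty) 1).map
      (fun _ => PySem.List.pyRepeat ["."] (bx - tx))).length = (by_ - ty).toNat := by
    rw [List.length_map, PySem.List.length_pyRange_one]
    omega
  have hrows0 : ∀ row ∈ (PySem.List.pyRange 0 (by_ - ty) 1).map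
      (fun _ => PySem.List.pyRepeat ["."] (bx - tx)), row.length = (bx - tx).toNat := by
    intro row hrow
    obtain ⟨_, _, hrow⟩ := List.mem_map.mp hrow
    rw [← hrow, PySem.List.pyRepeat_singleton, List.length_replicate]
  have hcell0 : ∀ r c : Nat, r < (by_ - ty).toNat → c < (bx - tx).toNat →
      ((((PySem.List.pyRange 0 (by_ - ty) 1).map
        (fun _ => PySem.List.pyRepeat ["."] (bx - tx))).getD r []).getD c "") = "." := by
    intro r c hr hc
    have : r < ((PySem.List.pyRange 0 (by_ - ty) 1).map
        (fun _ => PySem.List.pyRepeat ["."] (bx - tx))).length := by rw [hlen0]; exact hr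
    have hrow0 : ((PySem.List.pyRange 0 (by_ - ty) 1).map
        (fun _ => PySem.List.pyRepeat ["."] (bx - tx))).getD r []
        = PySem.List.pyRepeat ["."] (bx - tx) := by
      rw [List.getD_eq_getElem?_getD, List.getElem?_eq_getElem this, Option.getD_some,
        List.getElem_map]
    rw [hrow0, PySem.List.pyRepeat_singleton, List.getD_eq_getElem?_getD,
      List.getElem?_eq_getElem (by rw [List.length_replicate]; exact hc), Option.getD_some,
      List.getElem_replicate]
  -- shape of the final grid
  obtain ⟨hglen, hgrows⟩ := pvShape_foldl tx ty bx by_ (PySem.List.enumerate knots 0) _ hlen0 hrows0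
  -- compare the two row lists elementwise
  rw [PySem.List.pyRange_one ty by_, List.map_map]
  apply List.ext_getElem
  · rw [List.length_map, List.length_range, List.length_map, hglen]
  · intro r hr1 hr2
    rw [List.length_map, List.length_range] at hr1
    rw [List.length_map] at hr2
    rw [List.getElem_map, List.getElem_range, List.getElem_map]
    have hrowlen : ((PySem.List.enumerate knots 0).foldl (pvStep tx ty bx by_)
        ((PySem.List.pyRange 0 (by_ - ty) 1).map (fun _ => PySem.List.pyRepeat ["."] (bx - tx))))[r].length
        = (bx - tx).toNat := hgrows _ (List.getElem_mem hr2)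
    simp only [Function.comp]
    congr 1
    rw [hrow, PySem.List.pyRange_one tx bx, List.map_map]
    apply List.ext_getElem
    · rw [List.length_map, List.length_range, hrowlen]
    · intro c hc1 hc2
      rw [List.length_map, List.length_range] at hc1
      rw [List.getElem_map, List.getElem_range]
      have hrowD : ((PySem.List.enumerate knots 0).foldl (pvStep tx ty bx by_)
          ((PySem.List.pyRange 0 (by_ - ty) 1).map (fun _ => PySem.List.pyRepeat ["."] (bx - tx)))).getD r []
          = ((PySem.List.enumerate knots 0).foldl (pvStep tx ty bx by_)
          ((PySem.List.pyRange 0 (by_ - ty) 1).map (fun _ => PySem.List.pyRepeat ["."] (bx - tx))))[r] := by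
        rw [List.getD_eq_getElem?_getD, List.getElem?_eq_getElem hr2, Option.getD_some]
      have hgetD : ((PySem.List.enumerate knots 0).foldl (pvStep tx ty bx by_)
          ((PySem.List.pyRange 0 (by_ - ty) 1).map (fun _ => PySem.List.pyRepeat ["."] (bx - tx))))[r][c]
          = ((((PySem.List.enumerate knots 0).foldl (pvStep tx ty bx by_)
          ((PySem.List.pyRange 0 (by_ - ty) 1).map (fun _ => PySem.List.pyRepeat ["."] (bx - tx)))).getD r []).getD c "") := by
        rw [hrowD, List.getD_eq_getElem?_getD, List.getElem?_eq_getElem hc2, Option.getD_some]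
      rw [hgetD, pvCell tx ty bx by_ knots 0 _ hlen0 hrows0 r c hr1 hc1,
        if_pos (hcell0 r c hr1 hc1)]
      simp only [Function.comp_apply]
      cases PySem.List.index? knots (tx + (c : Int), ty + (r : Int)) with
      | none => rfl
      | some m => simp
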